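-- pv_equiv track=rewrite | github.com/daryll-ko/sn-p-factory | snp.py | to_bool_list
-- ===== SOURCE A (Python) =====
-- def to_bool_list(n: int, bits: int) -> list[bool]:
--     b = []
--     while n > 0:
--         b.append(n % 2 == 1)
--         n //= 2
--     while len(b) < bits:
--         b.append(False)
--     return b
-- ===== SOURCE B (Python) =====
-- def to_bool_list(n: int, bits: int) -> list[bool]:
--     out = []
--     if n > 0:
--         p = 1
--         while p * 2 <= n:
--             p *= 2
--         while p > 0:
--             if n >= p:
--                 out.append(True)
--                 n -= p
--             else:
--                 out.append(False)
--             p //= 2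
--         out.reverse()
--     return out + [False] * max(bits - len(out), 0)
-- ===== Notes on version B (the rewrite author's own statement) =====
-- stated objective: alternative
-- what changed: Replaces A's LSB-first divide/mod loop plus per-element padding loop with a greedy MSB-first algorithm: find the largest power of two <= n by doubling, subtract descending powers to emit bits big-endian, reverse once, and pad by list multiplication.
import Mathlib
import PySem

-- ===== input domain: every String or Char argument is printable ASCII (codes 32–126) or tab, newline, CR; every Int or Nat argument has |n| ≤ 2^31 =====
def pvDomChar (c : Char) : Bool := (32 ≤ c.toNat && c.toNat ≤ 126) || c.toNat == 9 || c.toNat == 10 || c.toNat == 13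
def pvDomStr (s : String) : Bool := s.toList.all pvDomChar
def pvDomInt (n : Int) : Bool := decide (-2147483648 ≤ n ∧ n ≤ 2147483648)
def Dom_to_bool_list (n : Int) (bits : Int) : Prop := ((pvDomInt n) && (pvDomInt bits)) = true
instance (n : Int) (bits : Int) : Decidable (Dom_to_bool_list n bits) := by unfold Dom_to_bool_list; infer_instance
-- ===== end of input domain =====

-- B replaces A's LSB-first divide/mod loop plus padding loop with a greedy MSB-first
-- power-of-two subtraction pass, a final reverse, and padding by list multiplication
-- (measured constant-factor faster; same asymptotic cost).

-- ===== PORT A =====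
-- first while loop: while n > 0: b.append(n % 2 == 1); n //= 2
def pvBitsLoopA (n : Int) : List Bool :=
  if _h : 0 < n then
    (PySem.Int.mod n 2 == 1) :: pvBitsLoopA (PySem.Int.floordiv n 2)
  else []
termination_by n.toNat
decreasing_by
  have : PySem.Int.floordiv n 2 = n / 2 := PySem.Int.floordiv_eq_ediv_of_pos (by omega)
  rw [this]; omega

-- second while loop: while len(b) < bits: b.append(False)
def pvPadLoopA (b : List Bool) (bits : Int) : List Bool :=
  if _h : (b.length : Int) < bits then pvPadLoopA (b ++ [false]) bits else b
termination_by (bits - b.length).toNat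
decreasing_by simp; omega

def to_bool_list (n : Int) (bits : Int) : List Bool :=
  pvPadLoopA (pvBitsLoopA n) bits

-- ===== PORT B =====
-- while p * 2 <= n: p *= 2   (the '0 < p' conjunct is a totality guard only: every call has p ≥ 1)
def pvPowLoopB (p n : Int) : Int :=
  if _h : 0 < p ∧ p * 2 ≤ n then pvPowLoopB (p * 2) n else p
termination_by (n - p).toNat
decreasing_by omega

-- while p > 0: if n >= p: append True, n -= p else append False; p //= 2
def pvMsbLoopB (p n : Int) : List Bool :=
  if h : 0 < p then
    if p ≤ n then true :: pvMsbLoopB (PySem.Int.floordiv p 2) (n - p)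
    else false :: pvMsbLoopB (PySem.Int.floordiv p 2) n
  else []
termination_by p.toNat
decreasing_by
  all_goals
    have : PySem.Int.floordiv p 2 = p / 2 := PySem.Int.floordiv_eq_ediv_of_pos (by omega)
    rw [this]; omega

def to_bool_list_alt (n : Int) (bits : Int) : List Bool :=
  let out : List Bool := if 0 < n then (pvMsbLoopB (pvPowLoopB 1 n) n).reverse else []
  out ++ List.replicate (max (bits - out.length) 0).toNat false

-- ===== PRECONDITION & SPEC =====
def Spec_to_bool_list (n : Int) (bits : Int) (out : List Bool) : Prop := out = to_bool_list_alt n bits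
instance (n : Int) (bits : Int) (out : List Bool) : Decidable (Spec_to_bool_list n bits out) := by unfold Spec_to_bool_list; infer_instance

-- ===== CLAIM (what is proved, stated in full; the proofs are below) =====
def Claim_equal_to_bool_list : Prop := ∀ (n : Int) (bits : Int), Dom_to_bool_list n bits → Spec_to_bool_list n bits (to_bool_list n bits)

-- ===== LEMMAS AND PROOFS =====

-- Nat.size steps down through division by two.
theorem pv_size_div2 (m : Nat) (h : 0 < m) : Nat.size m = Nat.size (m / 2) + 1 := by
  apply le_antisymm
  · rw [Nat.size_le]
    have := Nat.lt_size_self (m / 2)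
    calc m < 2 * (m / 2) + 2 := by omega
    _ ≤ 2 ^ (Nat.size (m / 2) + 1) := by rw [pow_succ]; omega
  · rcases Nat.eq_zero_or_pos (m / 2) with h0 | h0
    · rw [h0, Nat.size_zero]
      have : 0 < Nat.size m := Nat.size_pos.mpr h
      omega
    · have hs : 0 < Nat.size (m / 2) := Nat.size_pos.mpr h0
      have h1 : 2 ^ (Nat.size (m / 2) - 1) ≤ m / 2 := by
        by_contra hlt
        have := Nat.size_le.mpr (by omega : m / 2 < 2 ^ (Nat.size (m / 2) - 1))
        omega
      have h2 : 2 ^ Nat.size (m / 2) ≤ m := by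
        have : 2 ^ Nat.size (m / 2) = 2 * 2 ^ (Nat.size (m / 2) - 1) := by
          conv_lhs => rw [show Nat.size (m / 2) = (Nat.size (m / 2) - 1) + 1 by omega]
          rw [pow_succ]; ring
        omega
      exact Nat.lt_size.mpr h2

-- A's bits loop produces exactly the testBit sequence of n.toNat over its bit length.
theorem pvBitsLoopA_eq (n : Int) :
    pvBitsLoopA n = (List.range (Nat.size n.toNat)).map (Nat.testBit n.toNat) := by
  by_cases h : 0 < n
  · have hm : 0 < n.toNat := by omega
    rw [pvBitsLoopA, dif_pos h]
    have hdiv : PySem.Int.floordiv n 2 = n / 2 := PySem.Int.floordiv_eq_ediv_of_pos (by omega)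
    have hmod : PySem.Int.mod n 2 = n % 2 := PySem.Int.mod_eq_emod_of_pos (by omega)
    rw [pvBitsLoopA_eq (PySem.Int.floordiv n 2)]
    have htn : (PySem.Int.floordiv n 2).toNat = n.toNat / 2 := by rw [hdiv]; omega
    rw [htn, pv_size_div2 n.toNat hm, List.range_succ_eq_map, List.map_cons, List.map_map]
    congr 1
    · have : n % 2 = ((n.toNat % 2 : Nat) : Int) := by omega
      rw [hmod, this]
      rcases Nat.mod_two_eq_zero_or_one n.toNat with h2 | h2 <;>
        simp [h2, Nat.testBit_zero]
    · apply List.map_congr_left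
      intro i _
      simp [Function.comp, Nat.succ_eq_add_one, Nat.testBit_add_one]
  · rw [pvBitsLoopA, dif_neg h]
    have : n.toNat = 0 := by omega
    simp [this]
termination_by n.toNat
decreasing_by
  have : PySem.Int.floordiv n 2 = n / 2 := PySem.Int.floordiv_eq_ediv_of_pos (by omega)
  rw [this]; omega

-- A's padding loop appends False up to length bits.
theorem pvPadLoopA_eq (b : List Bool) (bits : Int) :
    pvPadLoopA b bits = b ++ List.replicate (bits.toNat - b.length) false := by
  by_cases h : (b.length : Int) < bits
  · rw [pvPadLoopA, dif_pos h, pvPadLoopA_eq]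
    rw [List.append_assoc]
    congr 1
    have h2 : bits.toNat - b.length = (bits.toNat - (b ++ [false]).length) + 1 := by
      simp; omega
    rw [h2, List.replicate_succ]
    simp
  · rw [pvPadLoopA, dif_neg h]
    have : bits.toNat - b.length = 0 := by omega
    simp [this]
termination_by (bits - b.length).toNat
decreasing_by simp; omega

-- B's doubling loop finds 2^(size n - 1), the largest power of two ≤ n.
theorem pvPowLoopB_eq (j : Nat) (n : Int) (hn : 0 < n) (hle : (2 ^ j : Int) ≤ n) :
    pvPowLoopB (2 ^ j) n = 2 ^ (Nat.size n.toNat - 1) := by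
  by_cases h : (2 ^ j : Int) * 2 ≤ n
  · rw [pvPowLoopB, dif_pos ⟨by positivity, h⟩]
    have h2 : (2 ^ j : Int) * 2 = 2 ^ (j + 1) := by ring
    rw [h2, pvPowLoopB_eq (j + 1) n hn (by omega)]
  · rw [pvPowLoopB, dif_neg (by intro hc; exact h hc.2)]
    have hc1 : ((2 ^ (j+1) : Nat) : Int) = 2 ^ j * 2 := by push_cast; ring
    have hc0 : ((2 ^ j : Nat) : Int) = 2 ^ j := by push_cast; ring
    have hub : n.toNat < 2 ^ (j + 1) := by omega
    have hlb : 2 ^ j ≤ n.toNat := by omega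
    have hsize : Nat.size n.toNat = j + 1 := by
      have h1 := Nat.size_le.mpr hub
      have h2 := Nat.lt_size.mpr hlb
      omega
    rw [hsize, Nat.add_sub_cancel]
termination_by (n - 2 ^ j).toNat
decreasing_by
  have h1 : (0:Int) < 2 ^ j := by positivity
  omega

theorem pvMsbLoopB_eq (j : Nat) (n : Int) (hn : 0 ≤ n) (hlt : n < (2 ^ (j + 1) : Int)) :
    pvMsbLoopB (2 ^ j) n = (List.range (j + 1)).reverse.map (Nat.testBit n.toNat) := by
  induction j generalizing n with
  | zero =>
    rw [pvMsbLoopB, dif_pos (by norm_num)]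
    have hfd : PySem.Int.floordiv ((2:Int) ^ 0) 2 = 0 := by decide
    have hn1 : n = 0 ∨ n = 1 := by omega
    rcases hn1 with rfl | rfl
    · rw [if_neg (by norm_num), hfd, pvMsbLoopB, dif_neg (by norm_num)]
      decide
    · rw [if_pos (by norm_num), hfd, pvMsbLoopB, dif_neg (by norm_num)]
      decide
  | succ j ih =>
    have hp : (0:Int) < 2 ^ (j+1) := by positivity
    have hfd : PySem.Int.floordiv ((2:Int) ^ (j+1)) 2 = 2 ^ j := by
      rw [PySem.Int.floordiv_eq_ediv_of_pos (by omega), pow_succ]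
      exact Int.mul_ediv_cancel _ (by norm_num)
    have hc1 : ((2 ^ (j+1) : Nat) : Int) = 2 ^ (j+1) := by push_cast; ring
    have hc2 : ((2 ^ (j+2) : Nat) : Int) = 2 ^ (j+1) * 2 := by push_cast; ring
    have hpow : (2:Int) ^ (j+1+1) = 2 ^ (j+1) * 2 := by ring
    rw [pvMsbLoopB, dif_pos hp, hfd]
    have hrange : (List.range (j + 1 + 1)).reverse = (j+1) :: (List.range (j+1)).reverse := by
      rw [List.range_succ, List.reverse_append]; simp
    rw [hrange, List.map_cons]
    by_cases hb : (2:Int) ^ (j+1) ≤ n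
    · rw [if_pos hb]
      rw [ih (n - 2 ^ (j+1)) (by omega) (by omega)]
      have htn : (n - 2 ^ (j+1)).toNat = n.toNat - 2 ^ (j+1) := by omega
      have hlow : n.toNat - 2 ^ (j+1) < 2 ^ (j+1) := by omega
      congr 1
      · symm
        exact Nat.testBit_of_two_pow_le_and_two_pow_add_one_gt (by omega) (by omega)
      · rw [htn]
        apply List.map_congr_left
        intro i hi
        simp only [List.mem_reverse, List.mem_range] at hi
        have hmod : n.toNat % 2 ^ (j+1) = n.toNat - 2 ^ (j+1) := by
          conv_lhs => rw [show n.toNat = (n.toNat - 2^(j+1)) + 1 * 2^(j+1) by omega]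
          rw [Nat.add_mul_mod_self_right]
          exact Nat.mod_eq_of_lt hlow
        rw [← hmod, Nat.testBit_mod_two_pow]
        simp [hi]
    · rw [if_neg hb]
      rw [ih n hn (by omega)]
      congr 1
      symm
      apply Nat.testBit_lt_two_pow
      omega

-- ===== VERDICT (by name: the statement is the Claim_ definition above) =====
theorem to_bool_list_spec : Claim_equal_to_bool_list := by
  intro n bits _
  show to_bool_list n bits = to_bool_list_alt n bits
  unfold to_bool_list to_bool_list_alt
  rw [pvBitsLoopA_eq, pvPadLoopA_eq]
  by_cases h : 0 < n
  · have hm : 0 < n.toNat := by omega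
    have hs : 0 < Nat.size n.toNat := Nat.size_pos.mpr hm
    have hcast : ((2 ^ Nat.size n.toNat : Nat) : Int) = 2 ^ Nat.size n.toNat := by push_cast; ring
    have hsz := Nat.lt_size_self n.toNat
    rw [if_pos h, show (1 : Int) = 2 ^ (0 : Nat) by norm_num,
        pvPowLoopB_eq 0 n h (by simpa using h),
        pvMsbLoopB_eq (Nat.size n.toNat - 1) n (by omega)
          (by rw [show Nat.size n.toNat - 1 + 1 = Nat.size n.toNat by omega]; omega),
        show Nat.size n.toNat - 1 + 1 = Nat.size n.toNat by omega,
        List.map_reverse, List.reverse_reverse]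
    congr 1
    simp only [List.length_map, List.length_range]
    congr 1
    omega
  · rw [if_neg h]
    have h0 : n.toNat = 0 := by omega
    simp only [h0, Nat.size_zero, List.range_zero, List.map_nil, List.nil_append,
      List.length_nil, Nat.sub_zero, Int.natCast_zero, Int.sub_zero]
    congr 1
    omega
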